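-- pv_equiv track=rewrite | github.com/ttanida/rgrg | src/language_model/evaluate_best_language_model.py | compute_scores_for_sentence_generation
-- ===== SOURCE A (Python) =====
-- def compute_scores_for_sentence_generation(tp, fp, fn, tn, generated_sentences, reference_sentences):
--     for gen_sentence, ref_sentence in zip(generated_sentences, reference_sentences):
--         ref_sentence = ref_sentence[0]  # since it's originally a list of str
--         # if a sentence == "#", it means it is empty
--         if ref_sentence != "#" and gen_sentence != "#":
--             tp += 1
--         elif ref_sentence == "#" and gen_sentence != "#":
--             fp += 1
--         elif ref_sentence != "#" and gen_sentence == "#":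
--             fn += 1
--         elif ref_sentence == "#" and gen_sentence == "#":
--             tn += 1
--
--     return tp, fp, fn, tn
-- ===== SOURCE B (Python) =====
-- def compute_scores_for_sentence_generation(tp, fp, fn, tn, generated_sentences, reference_sentences):
--     n = 0          # pairs seen
--     r_nonempty = 0 # reference not "#"
--     g_nonempty = 0 # generated not "#"
--     both = 0       # both not "#"
--     for gen_sentence, ref_sentence in zip(generated_sentences, reference_sentences):
--         ref_ne = ref_sentence[0] != "#"
--         gen_ne = gen_sentence != "#"
--         n += 1
--         r_nonempty += ref_ne
--         g_nonempty += gen_ne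
--         both += ref_ne and gen_ne
--     return (tp + both,
--             fp + (g_nonempty - both),
--             fn + (r_nonempty - both),
--             tn + (n - r_nonempty - g_nonempty + both))
-- ===== Notes on version B (the rewrite author's own statement) =====
-- stated objective: alternative
-- what changed: B counts pairs, nonempty references, nonempty generations and both-nonempty pairs in one pass, then derives tp/fp/fn/tn increments by confusion-matrix inclusion-exclusion instead of A's 4-way branch per pair.
import Mathlib
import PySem

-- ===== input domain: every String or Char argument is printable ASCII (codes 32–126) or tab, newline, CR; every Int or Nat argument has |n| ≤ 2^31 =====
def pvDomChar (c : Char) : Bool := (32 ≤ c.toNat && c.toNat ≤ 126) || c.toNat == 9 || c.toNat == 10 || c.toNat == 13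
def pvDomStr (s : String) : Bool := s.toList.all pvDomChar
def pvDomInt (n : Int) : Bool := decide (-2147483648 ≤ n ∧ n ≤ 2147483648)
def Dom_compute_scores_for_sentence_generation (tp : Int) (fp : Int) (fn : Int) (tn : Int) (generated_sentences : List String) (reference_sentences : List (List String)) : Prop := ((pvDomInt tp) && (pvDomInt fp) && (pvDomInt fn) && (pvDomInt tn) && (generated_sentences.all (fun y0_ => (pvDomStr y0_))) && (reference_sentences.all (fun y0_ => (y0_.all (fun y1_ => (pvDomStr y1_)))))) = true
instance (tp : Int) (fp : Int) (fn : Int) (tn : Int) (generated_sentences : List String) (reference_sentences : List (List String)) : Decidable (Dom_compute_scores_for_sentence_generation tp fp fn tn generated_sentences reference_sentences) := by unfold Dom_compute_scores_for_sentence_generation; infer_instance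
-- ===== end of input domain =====

-- B replaces A's 4-way per-pair branch by one pass counting pairs / nonempty refs / nonempty gens /
-- both-nonempty, deriving the four results by confusion-matrix arithmetic (objective: alternative).


-- ===== PORT A =====
-- loop over zip(generated, reference) with the four counters as state; ref_sentence[0] is
-- PySem.List.pyGet? … 0 (IndexError = none, excluded by Pre_; .getD "" there is unreachable inside Pre_)
def csgLoopA : List (String × List String) → Int → Int → Int → Int → Int × Int × Int × Int
  | [], tp, fp, fn, tn => (tp, fp, fn, tn)
  | p :: rest, tp, fp, fn, tn =>
    let ref := (PySem.List.pyGet? p.2 0).getD ""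
    if ref ≠ "#" ∧ p.1 ≠ "#" then csgLoopA rest (tp + 1) fp fn tn
    else if ref = "#" ∧ p.1 ≠ "#" then csgLoopA rest tp (fp + 1) fn tn
    else if ref ≠ "#" ∧ p.1 = "#" then csgLoopA rest tp fp (fn + 1) tn
    else if ref = "#" ∧ p.1 = "#" then csgLoopA rest tp fp fn (tn + 1)
    else csgLoopA rest tp fp fn tn

def compute_scores_for_sentence_generation (tp : Int) (fp : Int) (fn : Int) (tn : Int) (generated_sentences : List String) (reference_sentences : List (List String)) : Int × Int × Int × Int :=
  csgLoopA (generated_sentences.zip reference_sentences) tp fp fn tn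

-- ===== PORT B =====
-- one pass accumulating (n, r_nonempty, g_nonempty, both)
def csgLoopB : List (String × List String) → Int × Int × Int × Int → Int × Int × Int × Int
  | [], s => s
  | p :: rest, (n, r, g, b) =>
    let refNe : Bool := ((PySem.List.pyGet? p.2 0).getD "" != "#")
    let genNe : Bool := (p.1 != "#")
    csgLoopB rest (n + 1, r + (if refNe then 1 else 0), g + (if genNe then 1 else 0),
                   b + (if refNe && genNe then 1 else 0))

def compute_scores_for_sentence_generation_alt (tp : Int) (fp : Int) (fn : Int) (tn : Int) (generated_sentences : List String) (reference_sentences : List (List String)) : Int × Int × Int × Int :=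
  let s := csgLoopB (generated_sentences.zip reference_sentences) (0, 0, 0, 0)
  (tp + s.2.2.2, fp + (s.2.2.1 - s.2.2.2), fn + (s.2.1 - s.2.2.2),
   tn + (s.1 - s.2.1 - s.2.2.1 + s.2.2.2))

-- ===== PRECONDITION & SPEC =====
-- Pre_ excludes inputs where some zipped reference sentence list is empty: there A (and B) raise IndexError on ref_sentence[0].
def Pre_compute_scores_for_sentence_generation (tp : Int) (fp : Int) (fn : Int) (tn : Int) (generated_sentences : List String) (reference_sentences : List (List String)) : Prop :=
  ∀ p ∈ generated_sentences.zip reference_sentences, p.2 ≠ []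
instance (tp : Int) (fp : Int) (fn : Int) (tn : Int) (generated_sentences : List String) (reference_sentences : List (List String)) : Decidable (Pre_compute_scores_for_sentence_generation tp fp fn tn generated_sentences reference_sentences) := by unfold Pre_compute_scores_for_sentence_generation; infer_instance

def pvWitness_compute_scores_for_sentence_generation : Int × Int × Int × Int × List String × List (List String) :=
  (1, 2, 3, 4, ["hello", "#", "x"], [["#"], ["world"], ["x"]])

def Spec_compute_scores_for_sentence_generation (tp : Int) (fp : Int) (fn : Int) (tn : Int) (generated_sentences : List String) (reference_sentences : List (List String)) (out : Int × Int × Int × Int) : Prop := out = compute_scores_for_sentence_generation_alt tp fp fn tn generated_sentences reference_sentences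
instance (tp : Int) (fp : Int) (fn : Int) (tn : Int) (generated_sentences : List String) (reference_sentences : List (List String)) (out : Int × Int × Int × Int) : Decidable (Spec_compute_scores_for_sentence_generation tp fp fn tn generated_sentences reference_sentences out) := by unfold Spec_compute_scores_for_sentence_generation; infer_instance

-- ===== CLAIM (what is proved, stated in full; the proofs are below) =====
def Claim_equal_compute_scores_for_sentence_generation : Prop := ∀ (tp : Int) (fp : Int) (fn : Int) (tn : Int) (generated_sentences : List String) (reference_sentences : List (List String)), Dom_compute_scores_for_sentence_generation tp fp fn tn generated_sentences reference_sentences → Pre_compute_scores_for_sentence_generation tp fp fn tn generated_sentences reference_sentences → Spec_compute_scores_for_sentence_generation tp fp fn tn generated_sentences reference_sentences (compute_scores_for_sentence_generation tp fp fn tn generated_sentences reference_sentences)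

-- ===== LEMMAS AND PROOFS =====

-- B's loop is a shift of its run from (0,0,0,0)
theorem csgLoopB_shift (l : List (String × List String)) (n r g b : Int) :
    csgLoopB l (n, r, g, b) =
      ((csgLoopB l (0, 0, 0, 0)).1 + n, (csgLoopB l (0, 0, 0, 0)).2.1 + r,
       (csgLoopB l (0, 0, 0, 0)).2.2.1 + g, (csgLoopB l (0, 0, 0, 0)).2.2.2 + b) := by
  induction l generalizing n r g b with
  | nil => simp [csgLoopB]
  | cons p rest ih =>
    simp only [csgLoopB]
    rw [ih, ih (n := 0 + 1)]
    split_ifs <;> simp <;> omega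

theorem csgLoopA_eq (l : List (String × List String)) (tp fp fn tn : Int) :
    csgLoopA l tp fp fn tn =
      (tp + (csgLoopB l (0, 0, 0, 0)).2.2.2,
       fp + ((csgLoopB l (0, 0, 0, 0)).2.2.1 - (csgLoopB l (0, 0, 0, 0)).2.2.2),
       fn + ((csgLoopB l (0, 0, 0, 0)).2.1 - (csgLoopB l (0, 0, 0, 0)).2.2.2),
       tn + ((csgLoopB l (0, 0, 0, 0)).1 - (csgLoopB l (0, 0, 0, 0)).2.1 -
             (csgLoopB l (0, 0, 0, 0)).2.2.1 + (csgLoopB l (0, 0, 0, 0)).2.2.2)) := by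
  induction l generalizing tp fp fn tn with
  | nil => simp [csgLoopA, csgLoopB]
  | cons p rest ih =>
    simp only [csgLoopA, csgLoopB]
    rw [csgLoopB_shift]
    by_cases hr : (PySem.List.pyGet? p.2 0).getD "" = "#" <;>
      by_cases hg : p.1 = "#" <;>
      simp [hr, hg, ih, Prod.ext_iff] <;> omega

-- ===== VERDICT (by name: the statement is the Claim_ definition above) =====
theorem compute_scores_for_sentence_generation_spec : Claim_equal_compute_scores_for_sentence_generation := by
  intro tp fp fn tn gs rs _ _
  unfold Spec_compute_scores_for_sentence_generation compute_scores_for_sentence_generation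
    compute_scores_for_sentence_generation_alt
  exact csgLoopA_eq _ tp fp fn tn
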